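-- pv_equiv track=rewrite | github.com/0xs3fo/deponpm2 | src/npm_checker.py | _is_similar_name
-- ===== SOURCE A (Python) =====
-- def _is_similar_name(name1: str, name2: str) -> bool:
--     """
--     Check if two package names are similar (potential typosquatting)
--
--     Args:
--         name1: First package name
--         name2: Second package name
--
--     Returns:
--         True if names are similar
--     """
--     # Simple similarity check based on character differences
--     if abs(len(name1) - len(name2)) > 2:
--         return False
--
--     # Check for single character differences
--     if len(name1) == len(name2):
--         differences = sum(c1 != c2 for c1, c2 in zip(name1, name2))
--         return differences <= 1
--
--     # Check for single character insertion/deletion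
--     shorter, longer = (name1, name2) if len(name1) < len(name2) else (name2, name1)
--     if len(longer) - len(shorter) == 1:
--         # Check if shorter is a subsequence of longer
--         i = j = 0
--         while i < len(shorter) and j < len(longer):
--             if shorter[i] == longer[j]:
--                 i += 1
--             j += 1
--         return i == len(shorter)
--
--     return False
-- ===== SOURCE B (Python) =====
-- def _is_similar_name(name1: str, name2: str) -> bool:
--     # One-pass "one edit apart" check: walk both strings with two cursors,
--     # spending at most one edit (substitution / insertion / deletion) at the
--     # first mismatch; after the edit both remainders must match exactly.
--     s, t = name1, name2
--     i = j = 0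
--     used = False
--     while i < len(s) or j < len(t):
--         if i < len(s) and j < len(t) and s[i] == t[j]:
--             i += 1
--             j += 1
--             continue
--         if used:
--             return False
--         used = True
--         rs, rt = len(s) - i, len(t) - j
--         if rs == rt:
--             i += 1
--             j += 1
--         elif rs < rt:
--             j += 1
--         else:
--             i += 1
--     return True
-- ===== Notes on version B (the rewrite author's own statement) =====
-- stated objective: alternative
-- what changed: A branches on the length relation (Hamming count for equal lengths, a greedy subsequence scan for length difference 1); B is a single two-cursor pass that spends at most one edit at the first mismatch, i.e. a direct one-edit-apart (Levenshtein distance <= 1) check with no case split and no zip/sum.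
import Mathlib
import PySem

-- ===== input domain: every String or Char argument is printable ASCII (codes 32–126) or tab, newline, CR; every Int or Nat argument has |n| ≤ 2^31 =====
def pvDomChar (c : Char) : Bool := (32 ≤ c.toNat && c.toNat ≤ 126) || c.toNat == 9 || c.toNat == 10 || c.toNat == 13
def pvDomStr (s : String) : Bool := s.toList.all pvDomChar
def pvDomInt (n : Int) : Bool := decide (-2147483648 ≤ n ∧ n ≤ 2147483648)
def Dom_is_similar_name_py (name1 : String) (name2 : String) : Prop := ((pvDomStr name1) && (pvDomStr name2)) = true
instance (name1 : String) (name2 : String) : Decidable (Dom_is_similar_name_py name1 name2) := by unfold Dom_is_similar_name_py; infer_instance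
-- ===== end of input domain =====

-- B is an alternative same-cost implementation: one two-cursor pass spending at most
-- one edit, instead of A's length-based case split (Hamming count / subsequence scan).

-- ===== PORT A =====
-- sum(c1 != c2 for c1, c2 in zip(name1, name2))
def pvDiffA (s t : List Char) : Int :=
  (List.zip s t).foldl (fun acc p => acc + (if p.1 ≠ p.2 then (1 : Int) else 0)) 0

-- the while loop 'i = j = 0; while i < len(shorter) and j < len(longer): …; return i == len(shorter)',
-- as structural recursion on the unread suffixes shorter[i:], longer[j:] (i advances on match, j always)
def pvLoopA : List Char → List Char → Bool
  | [], _ => true                 -- i == len(shorter)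
  | _ :: _, [] => false           -- loop ended with i < len(shorter)
  | a :: s, b :: t => if a = b then pvLoopA s t else pvLoopA (a :: s) t

def is_similar_name_py (name1 : String) (name2 : String) : Bool :=
  let s1 := name1.toList
  let s2 := name2.toList
  if ((s1.length : Int) - (s2.length : Int)).natAbs > 2 then false
  else if s1.length = s2.length then decide (pvDiffA s1 s2 ≤ 1)
  else
    let p := if s1.length < s2.length then (s1, s2) else (s2, s1)
    if (p.2.length : Int) - (p.1.length : Int) = 1 then pvLoopA p.1 p.2
    else false

-- ===== PORT B =====
-- B's while loop over cursors i, j and the flag 'used', as structural recursion on the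
-- unread suffixes s[i:], t[j:] (rs = len(s)-i, rt = len(t)-j are the suffix lengths)
def pvGoB : List Char → List Char → Bool → Bool
  | [], [], _ => true
  | a :: s, b :: t, used =>
      if a = b then pvGoB s t used
      else if used then false
      else if s.length = t.length then pvGoB s t true
      else if s.length < t.length then pvGoB (a :: s) t true
      else pvGoB s (b :: t) true
  | [], _ :: t, used => if used then false else pvGoB [] t true
  | _ :: s, [], used => if used then false else pvGoB s [] true
termination_by s t _ => s.length + t.length

def is_similar_name_py_alt (name1 : String) (name2 : String) : Bool :=
  pvGoB name1.toList name2.toList false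

-- ===== PRECONDITION & SPEC =====
def Spec_is_similar_name_py (name1 : String) (name2 : String) (out : Bool) : Prop := out = is_similar_name_py_alt name1 name2
instance (name1 : String) (name2 : String) (out : Bool) : Decidable (Spec_is_similar_name_py name1 name2 out) := by unfold Spec_is_similar_name_py; infer_instance

-- ===== CLAIM (what is proved, stated in full; the proofs are below) =====
def Claim_equal_is_similar_name_py : Prop := ∀ (name1 : String) (name2 : String), Dom_is_similar_name_py name1 name2 → Spec_is_similar_name_py name1 name2 (is_similar_name_py name1 name2)

-- ===== LEMMAS AND PROOFS =====

theorem foldl_add_shift (l : List (Char × Char)) (c : Int) :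
    l.foldl (fun acc p => acc + (if p.1 ≠ p.2 then (1 : Int) else 0)) c
      = c + l.foldl (fun acc p => acc + (if p.1 ≠ p.2 then (1 : Int) else 0)) 0 := by
  induction l generalizing c with
  | nil => simp [List.foldl]
  | cons p l ih =>
      simp only [List.foldl]
      rw [ih, ih (0 + _)]
      ring

theorem pvDiffA_cons (a b : Char) (s t : List Char) :
    pvDiffA (a :: s) (b :: t) = (if a = b then 0 else 1) + pvDiffA s t := by
  unfold pvDiffA
  simp only [List.zip_cons_cons, List.foldl]
  rw [foldl_add_shift]
  by_cases h : a = b <;> simp [h]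

theorem pvDiffA_self (t : List Char) : pvDiffA t t = 0 := by
  induction t with
  | nil => rfl
  | cons a t ih => rw [pvDiffA_cons, if_pos rfl, ih]; ring

theorem pvDiffA_nonneg (s t : List Char) : 0 ≤ pvDiffA s t := by
  induction s generalizing t with
  | nil => cases t <;> simp [pvDiffA]
  | cons a s ih =>
      cases t with
      | nil => simp [pvDiffA]
      | cons b t =>
          rw [pvDiffA_cons]
          have := ih t
          by_cases h : a = b <;> simp [h] <;> omega

theorem pvDiffA_zero_iff (s t : List Char) (h : s.length = t.length) :
    pvDiffA s t = 0 ↔ s = t := by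
  induction s generalizing t with
  | nil => cases t with
      | nil => simp [pvDiffA]
      | cons b t => simp at h
  | cons a s ih =>
      cases t with
      | nil => simp at h
      | cons b t =>
          rw [pvDiffA_cons]
          have hlen : s.length = t.length := by simpa using h
          have h0 := pvDiffA_nonneg s t
          by_cases hab : a = b
          · simp [hab, ih t hlen]
          · constructor
            · intro hc
              exfalso
              rw [if_neg hab] at hc
              omega
            · intro hc
              injection hc with h1 h2
              exact absurd h1 hab

-- once the edit budget is spent, B's pass demands exact equality of the remainders
theorem pvGoB_true_eq (s t : List Char) : pvGoB s t true = decide (s = t) := by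
  induction s generalizing t with
  | nil => cases t <;> simp [pvGoB]
  | cons a s ih =>
      cases t with
      | nil => simp [pvGoB]
      | cons b t =>
          by_cases hab : a = b
          · simp [pvGoB, hab, ih t]
          · simp [pvGoB, hab]

-- equal lengths: B's pass is A's Hamming test
theorem pvGoB_eq_len (s t : List Char) (h : s.length = t.length) :
    pvGoB s t false = decide (pvDiffA s t ≤ 1) := by
  induction s generalizing t with
  | nil => cases t with
      | nil => simp [pvGoB, pvDiffA]
      | cons b t => simp at h
  | cons a s ih =>
      cases t with
      | nil => simp at h
      | cons b t =>
          have hlen : s.length = t.length := by simpa using h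
          by_cases hab : a = b
          · rw [show pvGoB (a :: s) (b :: t) false = pvGoB s t false by
                simp [pvGoB, hab]]
            rw [ih t hlen, pvDiffA_cons]
            simp [hab]
          · rw [show pvGoB (a :: s) (b :: t) false = pvGoB s t true by
                simp [pvGoB, hab, hlen]]
            rw [pvGoB_true_eq, pvDiffA_cons]
            have h0 := pvDiffA_nonneg s t
            have hz := pvDiffA_zero_iff s t hlen
            by_cases he : s = t
            · subst he
              simp [hab, pvDiffA_self]
            · have hpos : ¬ ((1 : Int) + pvDiffA s t ≤ 1) := by
                intro hc
                exact he (hz.mp (by omega))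
              simp [hab, he, hpos]

-- A's greedy scan decides the sublist relation
theorem pvLoopA_eq_sublist (s t : List Char) :
    pvLoopA s t = decide (List.Sublist s t) := by
  induction t generalizing s with
  | nil => cases s <;> simp [pvLoopA]
  | cons b t ih =>
      cases s with
      | nil => simp [pvLoopA]
      | cons a s =>
          by_cases hab : a = b
          · subst hab
            simp [pvLoopA, ih s, List.cons_sublist_cons]
          · rw [show pvLoopA (a :: s) (b :: t) = pvLoopA (a :: s) t by
                simp [pvLoopA, hab]]
            rw [ih (a :: s)]
            have hiff : (a :: s).Sublist (b :: t) ↔ (a :: s).Sublist t := by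
              constructor
              · intro h
                cases h with
                | cons _ h => exact h
                | cons₂ h => exact absurd rfl hab
              · intro h; exact h.cons b
            simp [hiff]
          
-- s one shorter than t: B's pass decides the sublist relation
theorem pvGoB_short (s t : List Char) (h : s.length + 1 = t.length) :
    pvGoB s t false = decide (List.Sublist s t) := by
  induction t generalizing s with
  | nil => simp at h
  | cons b t ih =>
      cases s with
      | nil =>
          have : t = [] := by
            cases t with
            | nil => rfl
            | cons c t' => simp at h
          subst this
          simp [pvGoB, pvGoB_true_eq]
      | cons a s =>
          have hlen : s.length + 1 = t.length := by simpa using h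
          by_cases hab : a = b
          · subst hab
            rw [show pvGoB (a :: s) (a :: t) false = pvGoB s t false by
                simp [pvGoB]]
            rw [ih s hlen]
            simp [List.cons_sublist_cons]
          · have hne : s.length ≠ t.length := by omega
            have hlt : s.length < t.length := by omega
            rw [show pvGoB (a :: s) (b :: t) false = pvGoB (a :: s) t true by
                simp [pvGoB, hab, hne, hlt]]
            rw [pvGoB_true_eq]
            have hiff : (a :: s).Sublist (b :: t) ↔ (a :: s) = t := by
              constructor
              · intro hs
                have hs' : (a :: s).Sublist t := by
                  cases hs with
                  | cons _ h => exact h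
                  | cons₂ h => exact absurd rfl hab
                exact hs'.eq_of_length (by simpa using hlen)
              · intro he; subst he; exact List.sublist_cons_self b _
            simp [hiff]

-- t one shorter than s: B's pass decides the reversed sublist relation
theorem pvGoB_long (s t : List Char) (h : t.length + 1 = s.length) :
    pvGoB s t false = decide (List.Sublist t s) := by
  induction s generalizing t with
  | nil => simp at h
  | cons a s ih =>
      cases t with
      | nil =>
          have : s = [] := by
            cases s with
            | nil => rfl
            | cons c s' => simp at h
          subst this
          simp [pvGoB, pvGoB_true_eq]
      | cons b t =>
          have hlen : t.length + 1 = s.length := by simpa using h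
          by_cases hab : a = b
          · subst hab
            rw [show pvGoB (a :: s) (a :: t) false = pvGoB s t false by
                simp [pvGoB]]
            rw [ih t hlen]
            simp [List.cons_sublist_cons]
          · have hne : s.length ≠ t.length := by omega
            have hnlt : ¬ s.length < t.length := by omega
            rw [show pvGoB (a :: s) (b :: t) false = pvGoB s (b :: t) true by
                simp [pvGoB, hab, hne, hnlt]]
            rw [pvGoB_true_eq]
            have hiff : (b :: t).Sublist (a :: s) ↔ s = b :: t := by
              constructor
              · intro hs
                have hs' : (b :: t).Sublist s := by
                  cases hs with
                  | cons _ h => exact h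
                  | cons₂ _ => exact absurd rfl hab
                exact (hs'.eq_of_length (by simp; omega)).symm
              · intro he; subst he; exact List.sublist_cons_self a _
            simp [hiff]

-- when the lengths differ by 2 or more, B's pass fails
theorem pvGoB_far (s t : List Char) (h : 2 ≤ ((s.length : Int) - t.length).natAbs) :
    pvGoB s t false = false := by
  induction s generalizing t with
  | nil =>
      cases t with
      | nil => simp at h
      | cons b t =>
          have : t ≠ [] := by
            intro he; subst he; simp at h
          rw [show pvGoB [] (b :: t) false = pvGoB [] t true by simp [pvGoB]]
          rw [pvGoB_true_eq]
          simp [this.symm]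
  | cons a s ih =>
      cases t with
      | nil =>
          have : s ≠ [] := by
            intro he; subst he; simp at h
          rw [show pvGoB (a :: s) [] false = pvGoB s [] true by simp [pvGoB]]
          rw [pvGoB_true_eq]
          simp [this]
      | cons b t =>
          have hlen : 2 ≤ ((s.length : Int) - t.length).natAbs := by
            simp only [List.length_cons] at h; omega
          have hne : s.length ≠ t.length := by omega
          by_cases hab : a = b
          · rw [show pvGoB (a :: s) (b :: t) false = pvGoB s t false by
                simp [pvGoB, hab]]
            exact ih t hlen
          · by_cases hlt : s.length < t.length
            · rw [show pvGoB (a :: s) (b :: t) false = pvGoB (a :: s) t true by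
                  simp [pvGoB, hab, hne, hlt]]
              rw [pvGoB_true_eq]
              have : (a :: s) ≠ t := by
                intro he
                have := congrArg List.length he
                simp at this; omega
              simp [this]
            · rw [show pvGoB (a :: s) (b :: t) false = pvGoB s (b :: t) true by
                  simp [pvGoB, hab, hne, hlt]]
              rw [pvGoB_true_eq]
              have : s ≠ b :: t := by
                intro he
                have := congrArg List.length he
                simp at this; omega
              simp [this]

-- ===== VERDICT (by name: the statement is the Claim_ definition above) =====
theorem is_similar_name_py_spec : Claim_equal_is_similar_name_py := by
  intro name1 name2 _
  unfold Spec_is_similar_name_py is_similar_name_py is_similar_name_py_alt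
  set s1 := name1.toList with hs1
  set s2 := name2.toList with hs2
  by_cases hfar : ((s1.length : Int) - (s2.length : Int)).natAbs > 2
  · rw [if_pos hfar, pvGoB_far s1 s2 (by omega)]
  · rw [if_neg hfar]
    by_cases heq : s1.length = s2.length
    · rw [if_pos heq, pvGoB_eq_len s1 s2 heq]
    · rw [if_neg heq]
      by_cases hlt : s1.length < s2.length
      · simp only [if_pos hlt]
        by_cases hone : ((s2.length : Int) - (s1.length : Int)) = 1
        · rw [if_pos hone, pvLoopA_eq_sublist, pvGoB_short s1 s2 (by omega)]
        · rw [if_neg hone, pvGoB_far s1 s2 (by omega)]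
      · simp only [if_neg hlt]
        by_cases hone : ((s1.length : Int) - (s2.length : Int)) = 1
        · rw [if_pos hone, pvLoopA_eq_sublist, pvGoB_long s1 s2 (by omega)]
        · rw [if_neg hone, pvGoB_far s1 s2 (by omega)]
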